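-- pv_equiv track=rewrite | github.com/Lilweavs/advent-of-code-2021 | Day 25/main.py | stepRight
-- ===== SOURCE A (Python) =====
-- def stepRight(data):
--     i = 0
--     moved = False
--     while i < len(data):
--         j = 0
--         tmp = len(data[0])-1
--         if data[i][j] != '.':
--             while data[i][tmp] == '>':
--                 tmp -= 1
--
--         while j <= tmp:
--
--             if data[i][j] == '>':
--                 while data[i][j] == '>':
--                     j += 1
--                     if j > tmp:
--                         if data[i][0] == '.':
--                             data[i][j-1], data[i][0] = '.', '>'
--                             moved = True
--                         break
--                     else:
--                         if data[i][j] == '.':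
--                             data[i][j-1], data[i][j] = '.', '>'
--                             j += 1
--                             moved = True
--                     if j > tmp:
--                         break
--             else:
--                 j += 1
--         i += 1
--
--     return moved
-- ===== SOURCE B (Python) =====
-- def stepRight(data):
--     if not data:
--         return False
--     cols = len(data[0])
--     moved = False
--     for row in data:
--         moves = [j for j in range(cols) if row[j] == '>' and row[(j + 1) % cols] == '.']
--         for j in moves:
--             row[j] = '.'
--             row[(j + 1) % cols] = '>'
--         if moves:
--             moved = True
--     return moved
-- ===== Notes on version B (the rewrite author's own statement) =====
-- stated objective: simpler
-- what changed: A walks each row with a mutating cascade of three nested while-loops plus a trailing-'>' pre-scan with negative-index wraparound; B instead does, per row, one read-only pass over the untouched row collecting the indices j with row[j]=='>' and row[(j+1)%cols]=='.', then applies them, returning whether any row had a move.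
import Mathlib
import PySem

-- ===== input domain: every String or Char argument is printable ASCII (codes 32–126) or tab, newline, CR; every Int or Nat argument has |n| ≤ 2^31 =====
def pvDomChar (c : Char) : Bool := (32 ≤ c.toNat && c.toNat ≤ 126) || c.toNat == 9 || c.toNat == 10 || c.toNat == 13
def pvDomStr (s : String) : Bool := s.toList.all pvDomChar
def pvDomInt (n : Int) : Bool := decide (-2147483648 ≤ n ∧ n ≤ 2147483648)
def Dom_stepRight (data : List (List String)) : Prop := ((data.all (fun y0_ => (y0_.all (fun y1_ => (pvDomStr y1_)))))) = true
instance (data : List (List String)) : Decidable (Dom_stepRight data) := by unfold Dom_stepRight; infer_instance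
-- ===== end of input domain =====

-- B rewrite: per row, collect the indices of all movable '>' in one read-only pass over the
-- untouched row, then apply them; A instead walks each row with a mutating cascade of nested
-- while-loops and a trailing-'>' pre-scan.  Both Pythons mutate `data` in place (on Pre_ they
-- leave identical data); the equivalence proved here is about the RETURN value.

-- ===== PORT A =====
-- the pre-scan `while data[i][tmp] == '>': tmp -= 1` (pyGet? none = IndexError).
-- The Nat argument is plain fuel making the loop structural; scanTmpA below passes
-- one unit more than the loop can consume, so the fuel-0 branch is unreachable.
def scanTmpAF (row : List String) : Nat → Int → Option Int
  | 0, _ => none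
  | fuel + 1, tmp =>
    match PySem.List.pyGet? row tmp with
    | none => none
    | some c => if c = ">" then scanTmpAF row fuel (tmp - 1) else some tmp

def scanTmpA (row : List String) (tmp : Int) : Option Int :=
  scanTmpAF row ((tmp + row.length + 1).toNat + 1) tmp

-- the inner `while data[i][j] == '>': …` loop (writes use pySetD; every Python write here is
-- preceded by a successful read at the same index, so the total form is exact); fuel as above
def innerAF (tmp : Int) : Nat → List String → Int → Bool → Option (List String × Int × Bool)
  | 0, _, _, _ => none
  | fuel + 1, row, j, moved =>
    match PySem.List.pyGet? row j with
    | none => none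
    | some c =>
      if c = ">" then
        -- j += 1
        if j + 1 > tmp then
          match PySem.List.pyGet? row 0 with
          | none => none
          | some c0 =>
            if c0 = "." then
              -- data[i][j-1], data[i][0] = '.', '>'  then break
              some (PySem.List.pySetD (PySem.List.pySetD row j ".") 0 ">", j + 1, true)
            else some (row, j + 1, moved)
        else
          match PySem.List.pyGet? row (j + 1) with
          | none => none
          | some cj =>
            if cj = "." then
              -- data[i][j-1], data[i][j] = '.', '>'  then j += 1
              let row' := PySem.List.pySetD (PySem.List.pySetD row j ".") (j + 1) ">"
              if j + 2 > tmp then some (row', j + 2, true)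
              else innerAF tmp fuel row' (j + 2) true
            else
              if j + 1 > tmp then some (row, j + 1, moved)
              else innerAF tmp fuel row (j + 1) moved
      else some (row, j, moved)

def innerA (row : List String) (tmp j : Int) (moved : Bool) :
    Option (List String × Int × Bool) :=
  innerAF tmp ((tmp - j).toNat + 1) row j moved

-- the outer `while j <= tmp:` loop over one row; fuel as above (j strictly increases)
def outerAF (tmp : Int) : Nat → List String → Int → Bool → Option Bool
  | 0, _, _, _ => none
  | fuel + 1, row, j, moved =>
    if j ≤ tmp then
      match PySem.List.pyGet? row j with
      | none => none
      | some c =>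
        if c = ">" then
          match innerA row tmp j moved with
          | none => none
          | some (row', j', moved') => outerAF tmp fuel row' j' moved'
        else outerAF tmp fuel row (j + 1) moved
    else some moved

def outerA (row : List String) (tmp j : Int) (moved : Bool) : Option Bool :=
  outerAF tmp ((tmp + 1 - j).toNat + 1) row j moved

-- one iteration of the row loop (body of `while i < len(data)`)
def rowA (cols : Int) (row : List String) (moved : Bool) : Option Bool :=
  match PySem.List.pyGet? row 0 with
  | none => none
  | some c0 =>
    match (if c0 ≠ "." then scanTmpA row (cols - 1) else some (cols - 1)) with
    | none => none
    | some tmp => outerA row tmp 0 moved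

def rowsA (cols : Int) (rows : List (List String)) (moved : Bool) : Option Bool :=
  match rows with
  | [] => some moved
  | r :: rs =>
    match rowA cols r moved with
    | none => none
    | some m => rowsA cols rs m

def stepRight (data : List (List String)) : Bool :=
  (rowsA ((data.headD []).length : Int) data false).getD false

-- ===== PORT B =====
def stepRight_alt (data : List (List String)) : Bool :=
  match data with
  | [] => false
  | r0 :: _ =>
    let cols : Int := (r0.length : Int)
    data.foldl
      (fun moved row =>
        let moves := (PySem.List.pyRange 0 cols 1).filter (fun j =>
          PySem.List.pyGet? row j == some ">" &&
          PySem.List.pyGet? row (PySem.Int.mod (j + 1) cols) == some ".")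
        -- (Source B then writes the moves back into `row`; that mutation does not feed the result)
        moved || !moves.isEmpty)
      false

-- ===== PRECONDITION & SPEC =====
-- Pre_ excludes exactly the inputs where A raises IndexError: a row shorter than the first row
-- (indexed at len(data[0])-1), or a row consisting entirely of '>' (the pre-scan runs off the
-- left end of the list).
def Pre_stepRight (data : List (List String)) : Prop :=
  ∀ row ∈ data, (data.headD []).length ≤ row.length ∧ ∃ c ∈ row, c ≠ ">"
instance (data : List (List String)) : Decidable (Pre_stepRight data) := by
  unfold Pre_stepRight; infer_instance

def pvWitness_stepRight : List (List String) :=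
  [[">", ">", ".", "v"], [".", ">", "v", "."], ["v", ".", ">", ">"]]

def Spec_stepRight (data : List (List String)) (out : Bool) : Prop := out = stepRight_alt data
instance (data : List (List String)) (out : Bool) : Decidable (Spec_stepRight data out) := by
  unfold Spec_stepRight; infer_instance

-- ===== CLAIM (what is proved, stated in full; the proofs are below) =====
def Claim_equal_stepRight : Prop :=
  ∀ (data : List (List String)), Dom_stepRight data → Pre_stepRight data →
    Spec_stepRight data (stepRight data)

-- ===== LEMMAS AND PROOFS =====

-- "cucumber k of the ORIGINAL row moves": interior move, or the wrap move at k = tmp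
def moveAt (orig : List String) (tmp k : Int) : Prop :=
  PySem.List.pyGet? orig k = some ">" ∧
    ((k < tmp ∧ PySem.List.pyGet? orig (k + 1) = some ".") ∨
     (k = tmp ∧ PySem.List.pyGet? orig 0 = some "."))

-- what A's pre-scan guarantees about tmp
def scanOK (orig : List String) (cols tmp : Int) : Prop :=
  (PySem.List.pyGet? orig 0 = some "." ∧ tmp = cols - 1) ∨
  (PySem.List.pyGet? orig 0 ≠ some "." ∧ tmp ≤ cols - 1 ∧
    (∃ c, PySem.List.pyGet? orig tmp = some c ∧ c ≠ ">") ∧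
    (∀ k : Int, tmp < k → k ≤ cols - 1 → PySem.List.pyGet? orig k = some ">"))

-- loop invariant: the mutated row agrees with the original at all positions ≥ j, and at 0 when the original holds '.'
def inv (orig row : List String) (j : Int) : Prop :=
  row.length = orig.length ∧
  (∀ k : Int, j ≤ k → PySem.List.pyGet? row k = PySem.List.pyGet? orig k) ∧
  (PySem.List.pyGet? orig 0 = some "." → PySem.List.pyGet? row 0 = some ".")

-- B's per-row verdict (exactly the Bool stepRight_alt computes for one row)
def rowB (cols : Int) (row : List String) : Bool :=
  !((PySem.List.pyRange 0 cols 1).filter (fun j =>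
      PySem.List.pyGet? row j == some ">" &&
      PySem.List.pyGet? row (PySem.Int.mod (j + 1) cols) == some ".")).isEmpty

-- the Prop it decides
theorem rowB_iff (cols : Int) (row : List String) :
    rowB cols row = true ↔
    (∃ j : Int, 0 ≤ j ∧ j < cols ∧ PySem.List.pyGet? row j = some ">" ∧
      PySem.List.pyGet? row (PySem.Int.mod (j + 1) cols) = some ".") := by
  rw [rowB, Bool.not_eq_eq_eq_not]
  simp only [Bool.not_true, List.isEmpty_eq_false_iff, ne_eq, List.filter_eq_nil_iff, not_forall]
  constructor
  · rintro ⟨j, hj, hp⟩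
    rw [PySem.List.mem_pyRange_one] at hj
    simp only [Bool.and_eq_true, beq_iff_eq, not_not] at hp
    exact ⟨j, hj.1, hj.2, hp⟩
  · rintro ⟨j, h0, h1, h2, h3⟩
    refine ⟨j, PySem.List.mem_pyRange_one.mpr ⟨h0, h1⟩, ?_⟩
    simp [h2, h3]

theorem pyGet?_pySetD_ne {α : Type} (xs : List α) (i k : Int) (v : α)
    (hi : 0 ≤ i) (hk : 0 ≤ k) (hne : i ≠ k) :
    PySem.List.pyGet? (PySem.List.pySetD xs i v) k = PySem.List.pyGet? xs k := by
  rw [PySem.List.pySetD_of_nonneg xs v hi,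
      PySem.List.pyGet?_of_nonneg _ hk, PySem.List.pyGet?_of_nonneg _ hk,
      List.getElem?_set_ne (by omega)]

theorem pyGet?_pySetD_self {α : Type} (xs : List α) (i : Int) (v : α)
    (hi : 0 ≤ i) (hl : i < (xs.length : Int)) :
    PySem.List.pyGet? (PySem.List.pySetD xs i v) i = some v := by
  rw [PySem.List.pySetD_of_nonneg xs v hi, PySem.List.pyGet?_of_nonneg _ hi,
      List.getElem?_set_self (by omega)]

theorem pyGet?_in_range {α : Type} (xs : List α) (i : Int)
    (h0 : 0 ≤ i) (hl : i < (xs.length : Int)) :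
    ∃ c, PySem.List.pyGet? xs i = some c :=
  ⟨_, PySem.List.pyGet?_eq_some_getElem xs h0 hl⟩

theorem all_gt_of_trail (row : List String) (cols t : Int)
    (hc0 : 0 ≤ cols) (htlow : t < -(row.length : Int))
    (htrail : ∀ k : Int, t < k → k ≤ cols - 1 → PySem.List.pyGet? row k = some ">") :
    ∀ x ∈ row, x = ">" := by
  intro x hx
  obtain ⟨m, hm, hxm⟩ := List.mem_iff_getElem.mp hx
  have hk : PySem.List.pyGet? row ((m : Int) - (row.length : Int)) = some x := by
    have h1 := PySem.List.pyGet?_neg_natCast (xs := row) (k := row.length - m)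
      (by omega) (by omega)
    have : -(((row.length - m : Nat)) : Int) = (m : Int) - (row.length : Int) := by
      push_cast [Nat.cast_sub (le_of_lt hm)]; ring
    rw [this] at h1
    rw [h1]
    have : row.length - (row.length - m) = m := by omega
    rw [this, List.getElem?_eq_getElem hm, hxm]
  have h2 := htrail ((m : Int) - (row.length : Int)) (by omega) (by omega)
  rw [hk] at h2
  exact Option.some.inj h2

theorem scanTmpA_spec (row : List String) (cols : Int)
    (hc0 : 0 ≤ cols) (hlen : cols ≤ (row.length : Int))
    (hex : ∃ c ∈ row, c ≠ ">") :
    ∀ t : Int, t ≤ cols - 1 →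
      (∀ k : Int, t < k → k ≤ cols - 1 → PySem.List.pyGet? row k = some ">") →
      ∃ t', scanTmpA row t = some t' ∧ t' ≤ cols - 1 ∧
        (∃ c, PySem.List.pyGet? row t' = some c ∧ c ≠ ">") ∧
        (∀ k : Int, t' < k → k ≤ cols - 1 → PySem.List.pyGet? row k = some ">") := by
  suffices H : ∀ n : Nat, ∀ t : Int, (t + row.length + 1).toNat < n → t ≤ cols - 1 →
      (∀ k : Int, t < k → k ≤ cols - 1 → PySem.List.pyGet? row k = some ">") →
      ∃ t', scanTmpAF row n t = some t' ∧ t' ≤ cols - 1 ∧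
        (∃ c, PySem.List.pyGet? row t' = some c ∧ c ≠ ">") ∧
        (∀ k : Int, t' < k → k ≤ cols - 1 → PySem.List.pyGet? row k = some ">") by
    intro t ht htrail
    exact H ((t + row.length + 1).toNat + 1) t (Nat.lt_succ_self _) ht htrail
  intro n
  induction n with
  | zero => intro t hmeas; omega
  | succ n ih =>
    intro t hmeas ht htrail
    rw [scanTmpAF]
    split
    · -- pyGet? row t = none
      rename_i h
      exfalso
      rw [PySem.List.pyGet?_eq_none_iff] at h
      simp [PySem.Raise.InRange] at h
      have htlow : t < -(row.length : Int) := by omega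
      obtain ⟨c, hc, hcne⟩ := hex
      exact hcne (all_gt_of_trail row cols t hc0 htlow htrail c hc)
    · rename_i c h
      by_cases hgt : c = ">"
      · rw [if_pos hgt]
        have hin : ¬ (PySem.List.pyGet? row t = none) := by rw [h]; simp
        rw [PySem.List.pyGet?_eq_none_iff] at hin
        simp [PySem.Raise.InRange] at hin
        refine ih (t - 1) (by omega) (by omega) ?_
        intro k hk1 hk2
        rcases eq_or_lt_of_le (by omega : t ≤ k) with rfl | hlt
        · rw [h, hgt]
        · exact htrail k hlt hk2
      · rw [if_neg hgt]
        exact ⟨t, rfl, ht, ⟨c, h, hgt⟩, htrail⟩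

theorem innerA_spec (orig : List String) (cols tmp : Int)
    (hlen : cols ≤ (orig.length : Int)) (hsc : scanOK orig cols tmp) :
    ∀ (j : Int) (row : List String) (moved : Bool),
      0 ≤ j → j ≤ tmp → inv orig row j →
      ∃ r' j' m', innerA row tmp j moved = some (r', j', m') ∧
        j ≤ j' ∧
        (m' = true ↔ (moved = true ∨ ∃ k : Int, j ≤ k ∧ k ≤ tmp ∧ k < j' ∧ moveAt orig tmp k)) ∧
        (j' ≤ tmp → inv orig r' j' ∧ PySem.List.pyGet? orig j' ≠ some ">") := by
  have htc : tmp ≤ cols - 1 := by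
    rcases hsc with ⟨_, h⟩ | ⟨_, h, _⟩ <;> omega
  suffices H : ∀ n : Nat, ∀ (j : Int) (row : List String) (moved : Bool),
      (tmp - j).toNat < n → 0 ≤ j → j ≤ tmp → inv orig row j →
      ∃ r' j' m', innerAF tmp n row j moved = some (r', j', m') ∧
        j ≤ j' ∧
        (m' = true ↔ (moved = true ∨ ∃ k : Int, j ≤ k ∧ k ≤ tmp ∧ k < j' ∧ moveAt orig tmp k)) ∧
        (j' ≤ tmp → inv orig r' j' ∧ PySem.List.pyGet? orig j' ≠ some ">") by
    intro j row moved h0 hjt hinv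
    exact H ((tmp - j).toNat + 1) j row moved (Nat.lt_succ_self _) h0 hjt hinv
  intro n
  induction n with
  | zero => intro j row moved hmeas; omega
  | succ n ih =>
    intro j row moved hmeas h0 hjt hinv
    obtain ⟨hL, hAg, hZ⟩ := hinv
    have hLi : (row.length : Int) = (orig.length : Int) := by exact_mod_cast congrArg Nat.cast hL
    have hjlen : j < (row.length : Int) := by omega
    have hget : PySem.List.pyGet? row j = PySem.List.pyGet? orig j := hAg j le_rfl
    obtain ⟨c, hc⟩ := pyGet?_in_range row j h0 hjlen
    rw [innerAF]
    rw [hc]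
    by_cases hcgt : c = ">"
    case neg =>
      simp only [if_neg hcgt]
      refine ⟨row, j, moved, rfl, le_rfl, ?_, ?_⟩
      · constructor
        · intro h; exact Or.inl h
        · rintro (h | ⟨k, hk1, _, hk3, _⟩)
          · exact h
          · omega
      · intro _
        refine ⟨⟨hL, hAg, hZ⟩, ?_⟩
        rw [← hget, hc]
        intro hEq
        exact hcgt (Option.some.inj hEq)
    case pos =>
      have horigj : PySem.List.pyGet? orig j = some ">" := by rw [← hget, hc, hcgt]
      simp only [if_pos hcgt]
      by_cases hw : j + 1 > tmp
      · simp only [if_pos hw]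
        have h1 : PySem.List.pyGet? orig 0 = some "." := by
          rcases hsc with ⟨h1, _⟩ | ⟨_, _, ⟨cc, hcc, hccne⟩, _⟩
          · exact h1
          · exfalso
            have hjtmp : j = tmp := by omega
            rw [hjtmp] at horigj
            rw [horigj] at hcc
            exact hccne (Option.some.inj hcc).symm
        have hrow0 : PySem.List.pyGet? row 0 = some "." := hZ h1
        rw [hrow0]
        simp only [reduceIte]
        refine ⟨_, j + 1, true, rfl, by omega, ?_, by omega⟩
        constructor
        · intro _
          exact Or.inr ⟨j, le_rfl, hjt, by omega, horigj, Or.inr ⟨by omega, h1⟩⟩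
        · intro _; rfl
      · simp only [if_neg hw]
        have hj1len : j + 1 < (row.length : Int) := by omega
        have hgets : PySem.List.pyGet? row (j + 1) = PySem.List.pyGet? orig (j + 1) :=
          hAg (j + 1) (by omega)
        obtain ⟨cj, hcj⟩ := pyGet?_in_range row (j + 1) (by omega) hj1len
        rw [hcj]
        have horigj1 : PySem.List.pyGet? orig (j + 1) = some cj := by rw [← hgets, hcj]
        by_cases hdot : cj = "."
        · simp only [if_pos hdot]
          have hmove : moveAt orig tmp j :=
            ⟨horigj, Or.inl ⟨by omega, by rw [horigj1, hdot]⟩⟩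
          have hinv' : inv orig (PySem.List.pySetD (PySem.List.pySetD row j ".") (j + 1) ">") (j + 2) := by
            refine ⟨?_, ?_, ?_⟩
            · rw [PySem.List.pySetD_of_nonneg _ _ (by omega : (0:Int) ≤ j + 1),
                  PySem.List.pySetD_of_nonneg _ _ h0]
              simp [hL]
            · intro k hk
              rw [pyGet?_pySetD_ne _ (j + 1) k _ (by omega) (by omega) (by omega),
                  pyGet?_pySetD_ne _ j k _ h0 (by omega) (by omega)]
              exact hAg k (by omega)
            · intro hd0
              by_cases hj0 : j = 0
              · rw [pyGet?_pySetD_ne _ (j + 1) 0 _ (by omega) (by omega) (by omega), ← hj0]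
                exact pyGet?_pySetD_self row j "." h0 (by omega)
              · rw [pyGet?_pySetD_ne _ (j + 1) 0 _ (by omega) (by omega) (by omega),
                    pyGet?_pySetD_ne _ j 0 _ h0 (by omega) (by omega)]
                exact hZ hd0
          by_cases hend : j + 2 > tmp
          · simp only [if_pos hend]
            refine ⟨_, j + 2, true, rfl, by omega, ?_, by omega⟩
            constructor
            · intro _
              exact Or.inr ⟨j, le_rfl, hjt, by omega, hmove⟩
            · intro _; rfl
          · simp only [if_neg hend]
            obtain ⟨r', j', m', hrec, hle, hiff, hlast⟩ :=
              ih (j + 2) _ true (by omega) (by omega) (by omega) hinv'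
            refine ⟨r', j', m', hrec, by omega, ?_, hlast⟩
            constructor
            · intro _
              exact Or.inr ⟨j, le_rfl, hjt, by omega, hmove⟩
            · intro _
              exact hiff.mpr (Or.inl rfl)
        · simp only [if_neg hdot]
          obtain ⟨r', j', m', hrec, hle, hiff, hlast⟩ :=
            ih (j + 1) row moved (by omega) (by omega) (by omega)
              ⟨hL, fun k hk => hAg k (by omega), hZ⟩
          have hnomove : ¬ moveAt orig tmp j := by
            rintro ⟨_, ⟨_, hnext⟩ | ⟨hjtmp, _⟩⟩
            · rw [horigj1] at hnext
              exact hdot (Option.some.inj hnext)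
            · omega
          refine ⟨r', j', m', hrec, by omega, ?_, hlast⟩
          constructor
          · intro hm
            rcases hiff.mp hm with h | ⟨k, hk1, hk2, hk3, hk4⟩
            · exact Or.inl h
            · exact Or.inr ⟨k, by omega, hk2, hk3, hk4⟩
          · intro h
            apply hiff.mpr
            rcases h with h | ⟨k, hk1, hk2, hk3, hk4⟩
            · exact Or.inl h
            · rcases eq_or_lt_of_le hk1 with rfl | hlt
              · exact absurd hk4 hnomove
              · exact Or.inr ⟨k, by omega, hk2, hk3, hk4⟩

theorem innerAF_j_le (tmp : Int) (fuel : Nat) (row : List String) (j : Int) (moved : Bool)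
    (r' : List String) (j' : Int) (m' : Bool)
    (h : innerAF tmp fuel row j moved = some (r', j', m')) : j ≤ j' := by
  fun_induction innerAF tmp fuel row j moved generalizing r' j' m' <;>
    simp_all <;> omega

theorem innerA_j_lt (row : List String) (tmp j : Int) (moved : Bool)
    (r' : List String) (j' : Int) (m' : Bool)
    (hc : PySem.List.pyGet? row j = some ">")
    (h : innerA row tmp j moved = some (r', j', m')) : j < j' := by
  unfold innerA at h
  rw [innerAF] at h
  rw [hc] at h
  simp only [reduceIte] at h
  split_ifs at h <;> (try split at h) <;> (try split_ifs at h) <;>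
    first
      | (cases h; done)
      | (cases h; omega)
      | (have := innerAF_j_le _ _ _ _ _ _ _ _ h; omega)

theorem outerA_spec (orig : List String) (cols tmp : Int)
    (hlen : cols ≤ (orig.length : Int)) (htc : tmp ≤ cols - 1) (hsc : scanOK orig cols tmp) :
    ∀ (j : Int) (row : List String) (moved : Bool),
      0 ≤ j → inv orig row j →
      ∃ b, outerA row tmp j moved = some b ∧
        (b = true ↔ (moved = true ∨ ∃ k : Int, j ≤ k ∧ k ≤ tmp ∧ moveAt orig tmp k)) := by
  suffices H : ∀ n : Nat, ∀ (j : Int) (row : List String) (moved : Bool),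
      (tmp + 1 - j).toNat < n → 0 ≤ j → inv orig row j →
      ∃ b, outerAF tmp n row j moved = some b ∧
        (b = true ↔ (moved = true ∨ ∃ k : Int, j ≤ k ∧ k ≤ tmp ∧ moveAt orig tmp k)) by
    intro j row moved h0 hinv
    exact H ((tmp + 1 - j).toNat + 1) j row moved (Nat.lt_succ_self _) h0 hinv
  intro n
  induction n with
  | zero => intro j row moved hmeas; omega
  | succ n ih =>
    intro j row moved hmeas h0 hinv
    rw [outerAF]
    by_cases hj : j ≤ tmp
    · rw [if_pos hj]
      obtain ⟨hL, hAg, hZ⟩ := hinv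
      have hLi : (row.length : Int) = (orig.length : Int) := by exact_mod_cast congrArg Nat.cast hL
      have hjlen : j < (row.length : Int) := by omega
      obtain ⟨c, hc⟩ := pyGet?_in_range row j h0 hjlen
      split
      case _ heq0 => rw [hc] at heq0; cases heq0
      case _ c' heq0 =>
      rw [hc] at heq0
      obtain rfl : c = c' := Option.some.inj heq0
      by_cases hcgt : c = ">"
      · simp only [if_pos hcgt]
        obtain ⟨r', j', m', hrec, hle, hiff, hlast⟩ :=
          innerA_spec orig cols tmp hlen hsc j row moved h0 hj ⟨hL, hAg, hZ⟩
        have hjlt : j < j' :=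
          innerA_j_lt row tmp j moved r' j' m' (by rw [hc, hcgt]) hrec
        split
        case _ heq => rw [hrec] at heq; cases heq
        case _ row'' j'' moved'' heq =>
        rw [hrec] at heq
        simp only [Option.some.injEq, Prod.mk.injEq] at heq
        obtain ⟨rfl, rfl, rfl⟩ := heq
        by_cases hj' : j' ≤ tmp
        · obtain ⟨hinv', _⟩ := hlast hj'
          obtain ⟨b, hb, hbiff⟩ := ih j' r' m' (by omega) (by omega) hinv'
          refine ⟨b, hb, ?_⟩
          constructor
          · intro h
            rcases hbiff.mp h with hm | ⟨k, hk1, hk2, hk4⟩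
            · rcases hiff.mp hm with hmm | ⟨k, hk1, hk2, _, hk4⟩
              · exact Or.inl hmm
              · exact Or.inr ⟨k, hk1, hk2, hk4⟩
            · exact Or.inr ⟨k, by omega, hk2, hk4⟩
          · intro h
            apply hbiff.mpr
            rcases h with hm | ⟨k, hk1, hk2, hk4⟩
            · exact Or.inl (hiff.mpr (Or.inl hm))
            · by_cases hkj : k < j'
              · exact Or.inl (hiff.mpr (Or.inr ⟨k, hk1, hk2, hkj, hk4⟩))
              · exact Or.inr ⟨k, by omega, hk2, hk4⟩
        · obtain ⟨n', rfl⟩ : ∃ m, n = m + 1 := ⟨n - 1, by omega⟩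
          refine ⟨m', by rw [outerAF, if_neg hj'], ?_⟩
          rw [hiff]
          constructor
          · rintro (hm | ⟨k, hk1, hk2, _, hk4⟩)
            · exact Or.inl hm
            · exact Or.inr ⟨k, hk1, hk2, hk4⟩
          · rintro (hm | ⟨k, hk1, hk2, hk4⟩)
            · exact Or.inl hm
            · exact Or.inr ⟨k, hk1, hk2, by omega, hk4⟩
      · simp only [if_neg hcgt]
        obtain ⟨b, hb, hbiff⟩ := ih (j + 1) row moved (by omega) (by omega)
          ⟨hL, fun k hk => hAg k (by omega), hZ⟩
        have hnomove : ¬ moveAt orig tmp j := by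
          rintro ⟨hjg, _⟩
          rw [← hAg j le_rfl, hc] at hjg
          exact hcgt (Option.some.inj hjg)
        refine ⟨b, hb, ?_⟩
        rw [hbiff]
        constructor
        · rintro (hm | ⟨k, hk1, hk2, hk4⟩)
          · exact Or.inl hm
          · exact Or.inr ⟨k, by omega, hk2, hk4⟩
        · rintro (hm | ⟨k, hk1, hk2, hk4⟩)
          · exact Or.inl hm
          · rcases eq_or_lt_of_le hk1 with rfl | hlt
            · exact absurd hk4 hnomove
            · exact Or.inr ⟨k, by omega, hk2, hk4⟩
    · rw [if_neg hj]
      refine ⟨moved, rfl, ?_⟩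
      constructor
      · exact fun h => Or.inl h
      · rintro (hm | ⟨k, hk1, hk2, _⟩)
        · exact hm
        · omega

theorem mod_id (x cols : Int) (h0 : 0 ≤ x) (h : x < cols) : PySem.Int.mod x cols = x := by
  rw [PySem.Int.mod_eq_emod_of_pos (by omega)]
  exact Int.emod_eq_of_lt h0 h

theorem mod_self_zero (cols : Int) (h : 0 < cols) : PySem.Int.mod cols cols = 0 := by
  rw [PySem.Int.mod_eq_emod_of_pos h]
  simp

theorem moves_equiv_noscan (row : List String) (cols : Int) :
    (∃ k : Int, 0 ≤ k ∧ k ≤ cols - 1 ∧ moveAt row (cols - 1) k) ↔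
    (∃ j : Int, 0 ≤ j ∧ j < cols ∧ PySem.List.pyGet? row j = some ">" ∧
      PySem.List.pyGet? row (PySem.Int.mod (j + 1) cols) = some ".") := by
  constructor
  · rintro ⟨k, hk0, hkt, hgt, ⟨hlt, hdot⟩ | ⟨hktmp, hdot0⟩⟩
    · exact ⟨k, hk0, by omega, hgt, by rw [mod_id (k + 1) cols (by omega) (by omega)]; exact hdot⟩
    · refine ⟨k, hk0, by omega, hgt, ?_⟩
      have : k + 1 = cols := by omega
      rw [this, mod_self_zero cols (by omega)]
      exact hdot0
  · rintro ⟨jj, hj0, hjc, hgt, hdot⟩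
    by_cases hlast : jj = cols - 1
    · subst hlast
      refine ⟨cols - 1, hj0, le_rfl, hgt, Or.inr ⟨rfl, ?_⟩⟩
      have : cols - 1 + 1 = cols := by omega
      rw [this, mod_self_zero cols (by omega)] at hdot
      exact hdot
    · refine ⟨jj, hj0, by omega, hgt, Or.inl ⟨by omega, ?_⟩⟩
      rwa [mod_id (jj + 1) cols (by omega) (by omega)] at hdot

theorem moves_equiv_scan (row : List String) (cols tmp : Int)
    (h0 : PySem.List.pyGet? row 0 ≠ some ".") (ht : tmp ≤ cols - 1)
    (hnt : ∃ c, PySem.List.pyGet? row tmp = some c ∧ c ≠ ">")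
    (htrail : ∀ k : Int, tmp < k → k ≤ cols - 1 → PySem.List.pyGet? row k = some ">") :
    (∃ k : Int, 0 ≤ k ∧ k ≤ tmp ∧ moveAt row tmp k) ↔
    (∃ j : Int, 0 ≤ j ∧ j < cols ∧ PySem.List.pyGet? row j = some ">" ∧
      PySem.List.pyGet? row (PySem.Int.mod (j + 1) cols) = some ".") := by
  constructor
  · rintro ⟨k, hk0, hkt, hgt, ⟨hlt, hdot⟩ | ⟨hktmp, hdot0⟩⟩
    · exact ⟨k, hk0, by omega, hgt, by rw [mod_id (k + 1) cols (by omega) (by omega)]; exact hdot⟩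
    · exact absurd hdot0 h0
  · rintro ⟨jj, hj0, hjc, hgt, hdot⟩
    by_cases h1 : jj < tmp
    · refine ⟨jj, hj0, by omega, hgt, Or.inl ⟨h1, ?_⟩⟩
      rwa [mod_id (jj + 1) cols (by omega) (by omega)] at hdot
    · exfalso
      by_cases h2 : jj = tmp
      · obtain ⟨cc, hcc, hccne⟩ := hnt
        rw [h2, hcc] at hgt
        exact hccne (Option.some.inj hgt)
      · by_cases h3 : jj = cols - 1
        · have : jj + 1 = cols := by omega
          rw [this, mod_self_zero cols (by omega)] at hdot
          exact h0 hdot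
        · have h4 := htrail (jj + 1) (by omega) (by omega)
          rw [mod_id (jj + 1) cols (by omega) (by omega)] at hdot
          rw [h4] at hdot
          exact absurd (Option.some.inj hdot) (by decide)

theorem rowA_spec (cols : Int) (row : List String) (moved : Bool)
    (hc0 : 0 ≤ cols) (hlen : cols ≤ (row.length : Int))
    (hex : ∃ c ∈ row, c ≠ ">") :
    rowA cols row moved = some (moved || rowB cols row) := by
  have hne : row ≠ [] := by rintro rfl; obtain ⟨c, hc, _⟩ := hex; cases hc
  have hlen0 : 0 < (row.length : Int) := by
    have := List.length_pos_of_ne_nil hne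
    omega
  obtain ⟨c0, hg0⟩ := pyGet?_in_range row 0 le_rfl hlen0
  rw [rowA, hg0]
  by_cases hdot : c0 = "."
  · simp only [hdot, ne_eq, not_true_eq_false, if_false]
    have hsc : scanOK row cols (cols - 1) := Or.inl ⟨by rw [hg0, hdot], rfl⟩
    show outerA row (cols - 1) 0 moved = some (moved || rowB cols row)
    obtain ⟨b, hb, hbiff⟩ := outerA_spec row cols (cols - 1) hlen (by omega) hsc 0 row moved
      le_rfl ⟨rfl, fun k _ => rfl, fun h => h⟩
    rw [hb]
    congr 1
    apply Bool.eq_iff_iff.mpr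
    rw [hbiff, Bool.or_eq_true, rowB_iff,
        moves_equiv_noscan row cols]
  · simp only [hdot, ne_eq, not_false_eq_true, if_true]
    obtain ⟨t', hscan, ht'c, hnt, htrail⟩ :=
      scanTmpA_spec row cols hc0 hlen hex (cols - 1) le_rfl (fun k hk1 hk2 => by omega)
    rw [hscan]
    show outerA row t' 0 moved = some (moved || rowB cols row)
    have h0ne : PySem.List.pyGet? row 0 ≠ some "." := by
      rw [hg0]; intro hEq; exact hdot (Option.some.inj hEq)
    have hsc : scanOK row cols t' := Or.inr ⟨h0ne, ht'c, hnt, htrail⟩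
    obtain ⟨b, hb, hbiff⟩ := outerA_spec row cols t' hlen ht'c hsc 0 row moved
      le_rfl ⟨rfl, fun k _ => rfl, fun h => h⟩
    rw [hb]
    congr 1
    apply Bool.eq_iff_iff.mpr
    rw [hbiff, Bool.or_eq_true, rowB_iff,
        moves_equiv_scan row cols t' h0ne ht'c hnt htrail]

theorem rowsA_spec (cols : Int) (hc0 : 0 ≤ cols) :
    ∀ (rows : List (List String)) (moved : Bool),
      (∀ row ∈ rows, cols ≤ (row.length : Int) ∧ ∃ c ∈ row, c ≠ ">") →
      rowsA cols rows moved =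
        some (rows.foldl (fun m row => m || rowB cols row) moved) := by
  intro rows
  induction rows with
  | nil => intro moved _; rfl
  | cons r rs ihr =>
    intro moved hall
    rw [rowsA, rowA_spec cols r moved hc0 (hall r List.mem_cons_self).1
        (hall r List.mem_cons_self).2]
    rw [List.foldl_cons]
    exact ihr (moved || rowB cols r) (fun row hrow => hall row (List.mem_cons_of_mem _ hrow))

-- ===== VERDICT (by name: the statement is the Claim_ definition above) =====
theorem stepRight_spec : Claim_equal_stepRight := by
  intro data _hdom hpre
  unfold Spec_stepRight
  match data with
  | [] => rfl
  | r0 :: rs =>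
    have hrows := rowsA_spec ((r0.length : Int)) (by positivity) (r0 :: rs) false ?_
    · unfold stepRight stepRight_alt
      simp only [List.headD_cons] at hrows ⊢
      rw [hrows]
      simp only [Option.getD_some]
      have hfun : (fun (moved : Bool) (row : List String) =>
          moved || !((PySem.List.pyRange 0 (r0.length : Int) 1).filter (fun j =>
            PySem.List.pyGet? row j == some ">" &&
            PySem.List.pyGet? row (PySem.Int.mod (j + 1) (r0.length : Int)) == some ".")).isEmpty)
          = (fun (m : Bool) (row : List String) => m || rowB (r0.length : Int) row) := by
        funext m row
        rfl
      rw [hfun]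
    · intro row hrow
      have := hpre row hrow
      simp only [List.headD_cons] at this
      exact ⟨by exact_mod_cast this.1, this.2⟩
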